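-- pv_equiv track=rewrite | github.com/paramanandmallik/ai-powered-honeypot | agents/detection_agent.py | _recommend_honeypot_types
-- ===== SOURCE A (Python) =====
-- from typing import Dict, List, Any, Optional, Tuple
--
-- def _recommend_honeypot_types(mitre_techniques: List[Dict[str, Any]]) -> List[str]:
--     """Recommend appropriate honeypot types based on detected techniques"""
--     honeypot_recommendations = []
--
--     technique_ids = [t["technique_id"] for t in mitre_techniques]
--
--     # SSH honeypot for command execution and lateral movement
--     if any(tid in ["T1059", "T1021", "T1105"] for tid in technique_ids):
--         honeypot_recommendations.append("ssh_honeypot")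
--
--     # Web admin portal for credential attacks
--     if any(tid in ["T1078", "T1110", "T1190"] for tid in technique_ids):
--         honeypot_recommendations.append("web_admin_portal")
--
--     # Database honeypot for data access attempts
--     if any(tid in ["T1005", "T1039", "T1041"] for tid in technique_ids):
--         honeypot_recommendations.append("database_honeypot")
--
--     # File share honeypot for discovery and collection
--     if any(tid in ["T1083", "T1005", "T1039"] for tid in technique_ids):
--         honeypot_recommendations.append("file_share_honeypot")
--
--     return honeypot_recommendations or ["ssh_honeypot"]  # Default to SSH honeypot
-- ===== SOURCE B (Python) =====
-- _TRIGGERS = {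
--     "T1059": ("ssh_honeypot",), "T1021": ("ssh_honeypot",), "T1105": ("ssh_honeypot",),
--     "T1078": ("web_admin_portal",), "T1110": ("web_admin_portal",), "T1190": ("web_admin_portal",),
--     "T1005": ("database_honeypot", "file_share_honeypot"),
--     "T1039": ("database_honeypot", "file_share_honeypot"),
--     "T1041": ("database_honeypot",),
--     "T1083": ("file_share_honeypot",),
-- }
-- _ORDER = ["ssh_honeypot", "web_admin_portal", "database_honeypot", "file_share_honeypot"]
--
-- def _recommend_honeypot_types(mitre_techniques):
--     """Recommend appropriate honeypot types based on detected techniques"""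
--     hit = set()
--     for t in mitre_techniques:
--         hit.update(_TRIGGERS.get(t["technique_id"], ()))
--     recs = [h for h in _ORDER if h in hit]
--     return recs or ["ssh_honeypot"]
-- ===== Notes on version B (the rewrite author's own statement) =====
-- stated objective: alternative
-- what changed: Inverts the mapping: instead of scanning the id list once per honeypot against its trigger list, B uses a reverse index (technique id -> honeypot names), accumulates the hit honeypots in a single pass over the techniques, then emits the fixed order list filtered by that hit set.
import Mathlib
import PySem

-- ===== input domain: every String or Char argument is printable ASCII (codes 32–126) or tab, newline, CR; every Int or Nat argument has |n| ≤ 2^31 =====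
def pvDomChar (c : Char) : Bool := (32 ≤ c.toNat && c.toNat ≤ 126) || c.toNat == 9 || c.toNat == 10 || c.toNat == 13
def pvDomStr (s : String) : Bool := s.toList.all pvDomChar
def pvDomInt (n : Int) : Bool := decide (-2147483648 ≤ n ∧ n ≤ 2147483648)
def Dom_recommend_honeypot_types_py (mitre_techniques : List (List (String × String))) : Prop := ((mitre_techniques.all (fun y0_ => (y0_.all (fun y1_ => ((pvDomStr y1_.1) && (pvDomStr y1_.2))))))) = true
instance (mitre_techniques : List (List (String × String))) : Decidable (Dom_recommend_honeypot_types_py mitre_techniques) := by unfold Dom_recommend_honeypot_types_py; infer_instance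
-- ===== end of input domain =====

-- B inverts the mapping: a reverse index (technique id -> honeypot names) is consumed in one
-- pass over the techniques into a hit set, and the fixed order list is filtered by that set.

-- ===== PORT A =====
-- t["technique_id"]: under Pre_ every dict contains the key, so find? is some; .getD "" is never taken.
def pvKey (t : List (String × String)) : String :=
  ((t.find? (fun kv => kv.1 == "technique_id")).map Prod.snd).getD ""

def recommend_honeypot_types_py (mitre_techniques : List (List (String × String))) : List String :=
  let technique_ids := mitre_techniques.map pvKey
  let recs : List String := []
  let recs := if technique_ids.any (fun tid => (["T1059", "T1021", "T1105"] : List String).contains tid) then recs ++ ["ssh_honeypot"] else recs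
  let recs := if technique_ids.any (fun tid => (["T1078", "T1110", "T1190"] : List String).contains tid) then recs ++ ["web_admin_portal"] else recs
  let recs := if technique_ids.any (fun tid => (["T1005", "T1039", "T1041"] : List String).contains tid) then recs ++ ["database_honeypot"] else recs
  let recs := if technique_ids.any (fun tid => (["T1083", "T1005", "T1039"] : List String).contains tid) then recs ++ ["file_share_honeypot"] else recs
  if recs.isEmpty then ["ssh_honeypot"] else recs

-- ===== PORT B =====
-- _TRIGGERS.get(key, ()): lookup in a literal dict with distinct literal keys, ported as an
-- if-chain over the keys in the dict's order (exact: first match = only match, default []).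
def pvTrig (s : String) : List String :=
  if s = "T1059" then ["ssh_honeypot"]
  else if s = "T1021" then ["ssh_honeypot"]
  else if s = "T1105" then ["ssh_honeypot"]
  else if s = "T1078" then ["web_admin_portal"]
  else if s = "T1110" then ["web_admin_portal"]
  else if s = "T1190" then ["web_admin_portal"]
  else if s = "T1005" then ["database_honeypot", "file_share_honeypot"]
  else if s = "T1039" then ["database_honeypot", "file_share_honeypot"]
  else if s = "T1041" then ["database_honeypot"]
  else if s = "T1083" then ["file_share_honeypot"]
  else []

def pvOrder : List String :=
  ["ssh_honeypot", "web_admin_portal", "database_honeypot", "file_share_honeypot"]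

def recommend_honeypot_types_py_alt (mitre_techniques : List (List (String × String))) : List String :=
  let hit : PySem.Set String :=
    mitre_techniques.foldl (fun s t => PySem.Set.update s (pvTrig (pvKey t))) PySem.Set.empty
  let recs := pvOrder.filter (fun h => PySem.Set.contains hit h)
  if recs.isEmpty then ["ssh_honeypot"] else recs

-- ===== PRECONDITION & SPEC =====
-- Pre_ excludes inputs where some technique dict lacks the key "technique_id": there both A and B raise KeyError.
def Pre_recommend_honeypot_types_py (mitre_techniques : List (List (String × String))) : Prop :=
  (mitre_techniques.all (fun t => t.any (fun kv => kv.1 == "technique_id"))) = true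
instance (mitre_techniques : List (List (String × String))) : Decidable (Pre_recommend_honeypot_types_py mitre_techniques) := by unfold Pre_recommend_honeypot_types_py; infer_instance

def pvWitness_recommend_honeypot_types_py : (List (List (String × String))) :=
  [[("technique_id", "T1059")], [("technique_id", "T1078")]]

def Spec_recommend_honeypot_types_py (mitre_techniques : List (List (String × String))) (out : List String) : Prop := out = recommend_honeypot_types_py_alt mitre_techniques
instance (mitre_techniques : List (List (String × String))) (out : List String) : Decidable (Spec_recommend_honeypot_types_py mitre_techniques out) := by unfold Spec_recommend_honeypot_types_py; infer_instance

-- ===== CLAIM (what is proved, stated in full; the proofs are below) =====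
def Claim_equal_recommend_honeypot_types_py : Prop := ∀ (mitre_techniques : List (List (String × String))), Dom_recommend_honeypot_types_py mitre_techniques → Pre_recommend_honeypot_types_py mitre_techniques → Spec_recommend_honeypot_types_py mitre_techniques (recommend_honeypot_types_py mitre_techniques)

-- ===== LEMMAS AND PROOFS =====

-- Membership in the accumulated hit set: y was contributed by some technique's triggers.
theorem mem_hit (mts : List (List (String × String))) (s0 : PySem.Set String) (y : String) :
    y ∈ mts.foldl (fun s t => PySem.Set.update s (pvTrig (pvKey t))) s0
      ↔ y ∈ s0 ∨ ∃ t ∈ mts, y ∈ pvTrig (pvKey t) := by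
  induction mts generalizing s0 with
  | nil => simp
  | cons t ts ih => simp [List.foldl, ih, PySem.Set.mem_update, or_assoc]

-- A's per-honeypot scan equals B's hit-set membership, given the reverse-index fact
-- "h ∈ pvTrig s ↔ s ∈ L" for that honeypot's trigger list L.
theorem cond_eq (mts : List (List (String × String))) (h : String) (L : List String)
    (hrev : ∀ s, h ∈ pvTrig s ↔ s ∈ L) :
    (mts.map pvKey).any (fun tid => L.contains tid)
      = PySem.Set.contains
          (mts.foldl (fun s t => PySem.Set.update s (pvTrig (pvKey t))) PySem.Set.empty) h := by
  rw [Bool.eq_iff_iff]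
  simp [List.any_eq_true, PySem.Set.contains, mem_hit, PySem.Set.empty, hrev]

theorem rev_ssh (s : String) :
    "ssh_honeypot" ∈ pvTrig s ↔ s ∈ (["T1059", "T1021", "T1105"] : List String) := by
  unfold pvTrig; split_ifs <;> simp_all

theorem rev_web (s : String) :
    "web_admin_portal" ∈ pvTrig s ↔ s ∈ (["T1078", "T1110", "T1190"] : List String) := by
  unfold pvTrig; split_ifs <;> simp_all

theorem rev_db (s : String) :
    "database_honeypot" ∈ pvTrig s ↔ s ∈ (["T1005", "T1039", "T1041"] : List String) := by
  unfold pvTrig; split_ifs <;> simp_all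

theorem rev_fs (s : String) :
    "file_share_honeypot" ∈ pvTrig s ↔ s ∈ (["T1083", "T1005", "T1039"] : List String) := by
  unfold pvTrig; split_ifs <;> simp_all

-- ===== VERDICT (by name: the statement is the Claim_ definition above) =====
theorem recommend_honeypot_types_py_spec : Claim_equal_recommend_honeypot_types_py := by
  intro mts _hdom _hpre
  unfold Spec_recommend_honeypot_types_py
  unfold recommend_honeypot_types_py recommend_honeypot_types_py_alt pvOrder
  simp only [List.filter,
    ← cond_eq mts "ssh_honeypot" _ rev_ssh,
    ← cond_eq mts "web_admin_portal" _ rev_web,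
    ← cond_eq mts "database_honeypot" _ rev_db,
    ← cond_eq mts "file_share_honeypot" _ rev_fs]
  cases h1 : (mts.map pvKey).any
      (fun tid => (["T1059", "T1021", "T1105"] : List String).contains tid) <;>
  cases h2 : (mts.map pvKey).any
      (fun tid => (["T1078", "T1110", "T1190"] : List String).contains tid) <;>
  cases h3 : (mts.map pvKey).any
      (fun tid => (["T1005", "T1039", "T1041"] : List String).contains tid) <;>
  cases h4 : (mts.map pvKey).any
      (fun tid => (["T1083", "T1005", "T1039"] : List String).contains tid) <;>
  simp_all
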